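-- pv_equiv track=rewrite | github.com/Limanaaa/Data-Analysis-Project | alex/scorer.py | score_fun
-- ===== SOURCE A (Python) =====
-- def score_fun(text: str, good_words: list, bad_words: list):
--     score_good = 0
--     score_bad = 0
--     for word in text.split():
--         if word in good_words:
--             score_good += 1
--         elif word in bad_words:
--             score_bad += 1
--     return score_good, score_bad
-- ===== SOURCE B (Python) =====
-- def score_fun(text: str, good_words: list, bad_words: list):
--     counts = {}
--     for w in text.split():
--         counts[w] = counts.get(w, 0) + 1
--     good_set = set(good_words)
--     bad_only = set(bad_words) - good_set
--     score_good = sum(counts.get(w, 0) for w in good_set)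
--     score_bad = sum(counts.get(w, 0) for w in bad_only)
--     return score_good, score_bad
-- ===== Notes on version B (the rewrite author's own statement) =====
-- stated objective: alternative
-- what changed: Builds a word-frequency dict from the text in one pass, then sums counts over the deduplicated good set and over set(bad)-set(good), instead of testing each text word against both lists.
import Mathlib
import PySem

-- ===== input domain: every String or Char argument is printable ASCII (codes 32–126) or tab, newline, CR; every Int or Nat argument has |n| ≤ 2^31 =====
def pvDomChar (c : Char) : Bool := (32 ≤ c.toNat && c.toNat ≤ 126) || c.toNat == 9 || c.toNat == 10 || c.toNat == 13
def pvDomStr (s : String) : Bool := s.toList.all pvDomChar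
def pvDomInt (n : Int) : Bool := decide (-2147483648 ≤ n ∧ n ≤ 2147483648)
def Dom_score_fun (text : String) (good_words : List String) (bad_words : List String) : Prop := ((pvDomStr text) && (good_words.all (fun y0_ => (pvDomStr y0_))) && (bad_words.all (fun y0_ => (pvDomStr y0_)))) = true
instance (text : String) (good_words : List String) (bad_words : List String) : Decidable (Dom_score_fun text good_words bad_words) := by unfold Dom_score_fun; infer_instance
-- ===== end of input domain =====

-- B builds a frequency dict over the text once and sums counts over set(good_words) and set(bad_words)-set(good_words),
-- inverting the traversal: it iterates the deduplicated word lists against a prebuilt index instead of scanning both lists per text word (objective: alternative).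


-- ===== PORT A =====
def score_fun (text : String) (good_words : List String) (bad_words : List String) : Int × Int :=
  (PySem.Str.split₀ text).foldl
    (fun s word =>
      if good_words.contains word then (s.1 + 1, s.2)
      else if bad_words.contains word then (s.1, s.2 + 1)
      else s)
    (0, 0)

-- ===== PORT B =====
def score_fun_alt (text : String) (good_words : List String) (bad_words : List String) : Int × Int :=
  let counts := (PySem.Str.split₀ text).foldl
    (fun d w => d.insert w (d.getD w 0 + 1)) PySem.Dict.empty
  let goodSet := PySem.Set.ofList good_words
  let badOnly := PySem.Set.diff (PySem.Set.ofList bad_words) goodSet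
  ((goodSet.map (fun w => counts.getD w 0)).sum,
   (badOnly.map (fun w => counts.getD w 0)).sum)

-- ===== PRECONDITION & SPEC =====
def Spec_score_fun (text : String) (good_words : List String) (bad_words : List String) (out : Int × Int) : Prop := out = score_fun_alt text good_words bad_words
instance (text : String) (good_words : List String) (bad_words : List String) (out : Int × Int) : Decidable (Spec_score_fun text good_words bad_words out) := by unfold Spec_score_fun; infer_instance

-- ===== CLAIM (what is proved, stated in full; the proofs are below) =====
def Claim_equal_score_fun : Prop := ∀ (text : String) (good_words : List String) (bad_words : List String), Dom_score_fun text good_words bad_words → Spec_score_fun text good_words bad_words (score_fun text good_words bad_words)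

-- ===== LEMMAS AND PROOFS =====

-- Σ_{w ∈ S} [w = x] over a duplicate-free S is the membership indicator of x.
lemma sum_indicator_nodup (S : List String) (hS : S.Nodup) (x : String) :
    (S.map (fun w => if w == x then (1 : Int) else 0)).sum
      = if S.contains x then (1 : Int) else 0 := by
  induction S with
  | nil => simp
  | cons y S' ih =>
    rcases List.nodup_cons.mp hS with ⟨hy, hS'⟩
    have hrest := ih hS'
    rw [List.map_cons, List.sum_cons, hrest]
    by_cases h : y = x
    · subst h
      simp
      exact hy
    · simp [h, Ne.symm h]

-- Σ_{w ∈ S} (ws.count w) over a duplicate-free S counts the elements of ws lying in S.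
lemma sum_count_nodup (S ws : List String) (hS : S.Nodup) :
    (S.map (fun w => (ws.count w : Int))).sum
      = (ws.countP (fun w => S.contains w) : Int) := by
  induction ws with
  | nil => simp
  | cons x t ih =>
    have hcnt : ∀ w : String, ((x :: t).count w : Int)
        = (t.count w : Int) + (if w == x then (1 : Int) else 0) := by
      intro w
      by_cases h : w = x
      · simp [h]
      · simp [h, Ne.symm h]
    calc (S.map (fun w => ((x :: t).count w : Int))).sum
        = (S.map (fun w => (t.count w : Int) + (if w == x then (1 : Int) else 0))).sum := by
          exact congrArg List.sum (List.map_congr_left (fun w _ => hcnt w))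
      _ = (S.map (fun w => (t.count w : Int))).sum
            + (S.map (fun w => if w == x then (1 : Int) else 0)).sum := by
          rw [PySem.List.sum_map_add_int]
      _ = ((x :: t).countP (fun w => S.contains w) : Int) := by
          rw [ih, sum_indicator_nodup S hS x, List.countP_cons]
          by_cases h : S.contains x = true <;> simp [h]

-- A's single fold over the text words is the pair of match-counts.
lemma scoreA_fold (ws good bad : List String) (g b : Int) :
    ws.foldl
      (fun s word =>
        if good.contains word then (s.1 + 1, s.2)
        else if bad.contains word then (s.1, s.2 + 1)
        else s)
      (g, b)
    = (g + (ws.countP (fun w => good.contains w) : Int),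
       b + (ws.countP (fun w => !good.contains w && bad.contains w) : Int)) := by
  induction ws generalizing g b with
  | nil => simp
  | cons x t ih =>
    rw [List.foldl_cons]
    cases hg : good.contains x <;> cases hb : bad.contains x <;>
      simp only [hg, hb, Bool.false_eq_true, if_true, if_false, ih, List.countP_cons,
        Bool.not_true, Bool.not_false, Bool.true_and, Bool.false_and, Prod.mk.injEq] <;>
      constructor <;> push_cast <;> omega

theorem score_fun_eq_alt (text : String) (good bad : List String) :
    score_fun text good bad = score_fun_alt text good bad := by
  unfold score_fun score_fun_alt
  set ws := PySem.Str.split₀ text with hws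
  have hget : ∀ w : String,
      (ws.foldl (fun d w => d.insert w (d.getD w 0 + 1)) PySem.Dict.empty).getD w 0
        = (ws.count w : Int) := by
    intro w
    rw [PySem.Dict.getD_foldl_insert_add_one]
    simp
  have hmapG :
      ((PySem.Set.ofList good).map
        (fun w => (ws.foldl (fun d w => d.insert w (d.getD w 0 + 1)) PySem.Dict.empty).getD w 0))
      = (PySem.Set.ofList good).map (fun w => (ws.count w : Int)) :=
    List.map_congr_left (fun w _ => hget w)
  have hmapB :
      ((PySem.Set.diff (PySem.Set.ofList bad) (PySem.Set.ofList good)).map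
        (fun w => (ws.foldl (fun d w => d.insert w (d.getD w 0 + 1)) PySem.Dict.empty).getD w 0))
      = (PySem.Set.diff (PySem.Set.ofList bad) (PySem.Set.ofList good)).map
          (fun w => (ws.count w : Int)) :=
    List.map_congr_left (fun w _ => hget w)
  rw [scoreA_fold]
  simp only [hmapG, hmapB]
  rw [sum_count_nodup _ ws (PySem.Set.nodup_ofList good),
      sum_count_nodup _ ws (PySem.Set.nodup_diff (PySem.Set.ofList bad) (PySem.Set.ofList good) (PySem.Set.nodup_ofList bad))]
  have hPg : ∀ w : String, List.contains (PySem.Set.ofList good) w = good.contains w := by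
    intro w
    simp [List.contains_eq_mem, PySem.Set.mem_ofList]
  have hPb : ∀ w : String,
      List.contains (PySem.Set.diff (PySem.Set.ofList bad) (PySem.Set.ofList good)) w
        = (!good.contains w && bad.contains w) := by
    intro w
    by_cases hgm : w ∈ good <;> by_cases hbm : w ∈ bad <;>
      simp [List.contains_eq_mem, PySem.Set.mem_diff, PySem.Set.mem_ofList, hgm, hbm]
  have h1 : ws.countP (fun w => List.contains (PySem.Set.ofList good) w)
      = ws.countP (fun w => good.contains w) :=
    List.countP_congr (fun w _ => by simp only [hPg w])
  have h2 : ws.countP (fun w => List.contains ((PySem.Set.ofList bad).diff (PySem.Set.ofList good)) w)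
      = ws.countP (fun w => !good.contains w && bad.contains w) :=
    List.countP_congr (fun w _ => by simp only [hPb w])
  rw [h1, h2]
  simp

-- ===== VERDICT (by name: the statement is the Claim_ definition above) =====
theorem score_fun_spec : Claim_equal_score_fun := by
  intro text good bad _
  unfold Spec_score_fun
  exact score_fun_eq_alt text good bad
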